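-- pv_equiv track=rewrite | github.com/kka2020/NEA-Timetabler | CSP.py | getConflicts
-- ===== SOURCE A (Python) =====
-- def getConflicts(conflict_list:dict[list]):
--     """
--     Converts input conflict_list into list of tuples of form (variable_1, variable_2)
--
--     Args:
--         conflict_list (dict[list]): Input conflict_list
--
--     Returns:
--         list[tuple]: Formatted conflict list
--     """
--     # Initialises a set to keep track of conflicts and to automatically remove duplicates
--     conflicts = set()
--
--     # Compare every variable with each other
--     for x in conflict_list:
--         for y in conflict_list:
--             # Skips if they're the same
--             if x == y:
--                 continue
--
--             # Adds conflict between x and y if they have any common associated entities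
--             if set(conflict_list[x]) & set(conflict_list[y]) != set():
--                 conflicts.add((x, y))
--
--     # Converts conflicts to list and returns
--     return list(conflicts)
-- ===== SOURCE B (Python) =====
-- def getConflicts(conflict_list):
--     # Build an inverted index entity -> list of variables associated with it,
--     # then test each ordered pair via a per-variable partner set (O(1) per pair)
--     # instead of recomputing a set intersection for every pair.
--     index = {}
--     for var, ents in conflict_list.items():
--         for e in ents:
--             index.setdefault(e, []).append(var)
--     conflicts = set()
--     for x, ents in conflict_list.items():
--         partners = set()
--         for e in ents:
--             partners.update(index.get(e, []))
--         for y in conflict_list: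
--             if x != y and y in partners:
--                 conflicts.add((x, y))
--     return list(conflicts)
-- ===== Notes on version B (the rewrite author's own statement) =====
-- stated objective: faster
-- what changed: Replaces the per-pair set-intersection test (building two sets for every ordered pair) by an inverted index entity->variables built once plus a per-variable partner set, so each ordered pair is tested with one O(1) membership lookup.
import Mathlib
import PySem

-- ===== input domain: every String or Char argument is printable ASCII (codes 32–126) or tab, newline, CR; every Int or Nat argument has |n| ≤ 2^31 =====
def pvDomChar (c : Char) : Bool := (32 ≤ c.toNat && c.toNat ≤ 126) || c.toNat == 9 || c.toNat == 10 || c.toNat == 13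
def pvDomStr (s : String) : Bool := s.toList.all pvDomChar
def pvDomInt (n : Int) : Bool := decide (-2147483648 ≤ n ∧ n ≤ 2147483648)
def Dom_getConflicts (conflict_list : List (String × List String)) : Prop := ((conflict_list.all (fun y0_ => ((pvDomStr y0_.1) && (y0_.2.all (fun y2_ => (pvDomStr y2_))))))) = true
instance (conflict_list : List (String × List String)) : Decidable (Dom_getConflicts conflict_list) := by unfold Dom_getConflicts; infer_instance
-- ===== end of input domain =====

-- B replaces A's per-ordered-pair set intersection by an inverted index entity->variables
-- built once plus a per-variable partner set (objective: faster, measured).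
-- Both Pythons return list(set(...)); the ports return the set in first-insertion order
-- (outputs are compared as sets).

-- ===== PORT A =====
-- A iterates the dict's keys and looks each key up; under Pre_ (distinct keys,
-- as any Python dict has) this is the same as iterating the (key, value) entries.
def getConflicts (conflict_list : List (String × List String)) : List (String × String) :=
  conflict_list.foldl (fun conflicts x =>
    conflict_list.foldl (fun conflicts y =>
      if x.1 == y.1 then conflicts
      else if !(PySem.Set.equal
                  (PySem.Set.inter (PySem.Set.ofList x.2) (PySem.Set.ofList y.2))
                  PySem.Set.empty) then
        PySem.Set.add conflicts (x.1, y.1)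
      else conflicts) conflicts) PySem.Set.empty

-- ===== PORT B =====
-- the inverted index: entity -> list of variables associated with it (dict of lists via setdefault/append)
def bIndex (conflict_list : List (String × List String)) : PySem.Dict String (List String) :=
  conflict_list.foldl (fun d x =>
    x.2.foldl (fun d e => d.modify e [] (fun vs => vs ++ [x.1])) d) PySem.Dict.empty

def getConflicts_alt (conflict_list : List (String × List String)) : List (String × String) :=
  let index := bIndex conflict_list
  conflict_list.foldl (fun conflicts x =>
    let partners : PySem.Set String :=
      x.2.foldl (fun s e => PySem.Set.update s (index.getD e [])) PySem.Set.empty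
    conflict_list.foldl (fun conflicts y =>
      if x.1 != y.1 && partners.contains y.1 then PySem.Set.add conflicts (x.1, y.1)
      else conflicts) conflicts) PySem.Set.empty

-- ===== PRECONDITION & SPEC =====
-- Pre_ requires the keys to be pairwise distinct: the Python argument is a dict, whose
-- keys are necessarily distinct, so this excludes no input the Python A accepts.
def Pre_getConflicts (conflict_list : List (String × List String)) : Prop :=
  (conflict_list.map Prod.fst).Nodup
instance (conflict_list : List (String × List String)) : Decidable (Pre_getConflicts conflict_list) := by
  unfold Pre_getConflicts; infer_instance

def pvWitness_getConflicts : (List (String × List String)) :=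
  [("a", ["e", "f"]), ("b", ["f"]), ("c", [])]

def Spec_getConflicts (conflict_list : List (String × List String)) (out : List (String × String)) : Prop := out = getConflicts_alt conflict_list
instance (conflict_list : List (String × List String)) (out : List (String × String)) : Decidable (Spec_getConflicts conflict_list out) := by unfold Spec_getConflicts; infer_instance

-- ===== CLAIM (what is proved, stated in full; the proofs are below) =====
def Claim_equal_getConflicts : Prop := ∀ (conflict_list : List (String × List String)), Dom_getConflicts conflict_list → Pre_getConflicts conflict_list → Spec_getConflicts conflict_list (getConflicts conflict_list)

-- ===== LEMMAS AND PROOFS =====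

-- membership in the inverted index
lemma bIndex_getD (cl : List (String × List String)) (e : String) :
    (bIndex cl).getD e [] =
      ((cl.flatMap (fun x => x.2.map (fun e' => (e', x.1)))).filter (fun p => p.1 == e)).map (·.2) := by
  have h : bIndex cl =
      (cl.flatMap (fun x => x.2.map (fun e' => (e', x.1)))).foldl
        (fun d p => d.modify p.1 [] (fun vs => vs ++ [p.2])) PySem.Dict.empty := by
    rw [List.foldl_flatMap]
    unfold bIndex
    congr 1
    funext d x
    rw [List.foldl_map]
  rw [h, PySem.Dict.getD_foldl_modify_append]
  simp [PySem.Dict.getD_empty]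

lemma mem_bIndex (cl : List (String × List String)) (e v : String) :
    v ∈ (bIndex cl).getD e [] ↔ ∃ x ∈ cl, v = x.1 ∧ e ∈ x.2 := by
  simp only [bIndex_getD, List.mem_map, List.mem_filter, List.mem_flatMap]
  constructor
  · rintro ⟨p, ⟨⟨x, hx, ⟨e', he', rfl⟩⟩, hpe⟩, rfl⟩
    simp at hpe
    exact ⟨x, hx, rfl, hpe ▸ he'⟩
  · rintro ⟨x, hx, rfl, he⟩
    exact ⟨(e, x.1), ⟨⟨x, hx, e, he, rfl⟩, by simp⟩, rfl⟩

-- membership through the partner-set accumulation loop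
lemma mem_foldl_update {α β : Type} [BEq α] [LawfulBEq α] (g : β → List α) (l : List β)
    (s : PySem.Set α) (a : α) :
    a ∈ l.foldl (fun s e => PySem.Set.update s (g e)) s ↔ a ∈ s ∨ ∃ e ∈ l, a ∈ g e := by
  induction l generalizing s with
  | nil => simp
  | cons hd tl ih =>
    simp only [List.foldl_cons, ih, PySem.Set.mem_update, List.mem_cons]
    constructor
    · rintro (⟨h | h⟩ | ⟨e, he, h⟩)
      · exact Or.inl h
      · exact Or.inr ⟨hd, Or.inl rfl, h⟩
      · exact Or.inr ⟨e, Or.inr he, h⟩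
    · rintro (h | ⟨e, (rfl | he), h⟩)
      · exact Or.inl (Or.inl h)
      · exact Or.inl (Or.inr h)
      · exact Or.inr ⟨e, he, h⟩

-- A's intersection test, as a proposition
lemma condA_iff (a b : List String) :
    (!(PySem.Set.equal (PySem.Set.inter (PySem.Set.ofList a) (PySem.Set.ofList b))
        PySem.Set.empty)) = true ↔ ∃ e ∈ a, e ∈ b := by
  simp [PySem.Set.equal, PySem.Set.issubset, PySem.Set.inter, PySem.Set.empty,
    PySem.Set.contains, List.mem_filter, PySem.Set.mem_ofList]

-- ===== VERDICT (by name: the statement is the Claim_ definition above) =====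
theorem getConflicts_spec : Claim_equal_getConflicts := by
  intro cl _ hpre
  unfold Spec_getConflicts getConflicts getConflicts_alt
  apply PySem.List.foldl_congr_mem
  intro acc x hx
  apply PySem.List.foldl_congr_mem
  intro acc' y hy
  by_cases hxy : x.1 = y.1
  · simp [hxy]
  · have hcond :
        (x.1 != y.1 &&
          PySem.Set.contains
            (x.2.foldl (fun s e => PySem.Set.update s ((bIndex cl).getD e [])) PySem.Set.empty)
            y.1) = true ↔ ∃ e ∈ x.2, e ∈ y.2 := by
      simp only [Bool.and_eq_true, bne_iff_ne, ne_eq]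
      rw [PySem.Set.contains_iff _ _, mem_foldl_update]
      simp only [PySem.Set.empty, List.not_mem_nil, false_or]
      constructor
      · rintro ⟨-, e, he, hyi⟩
        rw [mem_bIndex] at hyi
        obtain ⟨z, hz, hzy, hez⟩ := hyi
        have : z = y := List.inj_on_of_nodup_map hpre hz hy hzy.symm
        exact ⟨e, he, this ▸ hez⟩
      · rintro ⟨e, he, hey⟩
        exact ⟨hxy, e, he, (mem_bIndex cl e y.1).mpr ⟨y, hy, rfl, hey⟩⟩
    by_cases hshare : ∃ e ∈ x.2, e ∈ y.2
    · rw [if_neg (by simp [hxy]), if_pos ((condA_iff x.2 y.2).mpr hshare),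
        if_pos (hcond.mpr hshare)]
    · rw [if_neg (by simp [hxy]), if_neg (fun h => hshare ((condA_iff x.2 y.2).mp h)),
        if_neg (fun h => hshare (hcond.mp h))]
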